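-- pv_equiv track=rewrite | github.com/allchemy-net/MCRcode | scoreHelpers.py | _calcMetalsOnPath
-- ===== SOURCE A (Python) =====
-- problematic_metals = {'[Na', '[K', '[Li', '[Rb', '[Cs', '[Be', '[Mg', '[Ca', '[Sr', '[Ba',
--                       '[Sc', '[Y', '[Ti', '[Zr', '[V', '[Cr', '[Mo', '[W', '[Mn', '[Re', '[Fe', '[Ru', '[Os', '[Co',
--                       '[Rh', '[Ir', '[Ni', '[Pd', '[Pt', '[Cu', '[Ag', '[Au',
--                       '[Zn', '[Cd', '[Hg', '[Al', '[Ga', '[In', '[Tl', '[Ge', '[Sn', '[Pb', '[Bi', '[Sb',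
--                       '[Ce', '[Pr', '[Nd', '[Pm', '[Sm', '[Eu', '[Gd', '[U',
--                       }
--
-- def _calcMetalsOnPath(histToShow):
--     metals = dict()
--     for step in histToShow:
--         for elem in step[3] + step[4]:
--             for met in problematic_metals:
--                 if met in elem:
--                     metal = met[1:]
--                     if metal not in metals:
--                         metals[metal] = set()
--                     metals[metal].add(elem)
--     return metals
-- ===== SOURCE B (Python) =====
-- problematic_metals = {'[Na', '[K', '[Li', '[Rb', '[Cs', '[Be', '[Mg', '[Ca', '[Sr', '[Ba',
--                       '[Sc', '[Y', '[Ti', '[Zr', '[V', '[Cr', '[Mo', '[W', '[Mn', '[Re', '[Fe', '[Ru', '[Os', '[Co',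
--                       '[Rh', '[Ir', '[Ni', '[Pd', '[Pt', '[Cu', '[Ag', '[Au',
--                       '[Zn', '[Cd', '[Hg', '[Al', '[Ga', '[In', '[Tl', '[Ge', '[Sn', '[Pb', '[Bi', '[Sb',
--                       '[Ce', '[Pr', '[Nd', '[Pm', '[Sm', '[Eu', '[Gd', '[U',
--                       }
--
-- _SYMBOLS = sorted(m[1:] for m in problematic_metals)
-- _ONE = {s for s in _SYMBOLS if len(s) == 1}
-- _TWO = {s for s in _SYMBOLS if len(s) == 2}
--
--
-- def _scan(elem):
--     # one left-to-right pass: at each '[' probe the next two / one characters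
--     found = set()
--     for i, ch in enumerate(elem):
--         if ch == '[':
--             t2 = elem[i + 1:i + 3]
--             if t2 in _TWO:
--                 found.add(t2)
--             t1 = elem[i + 1:i + 2]
--             if t1 in _ONE:
--                 found.add(t1)
--     return found
--
--
-- def _addSyms(elem, syms, metals):
--     for sym in syms:
--         metals.setdefault(sym, set()).add(elem)
--     return metals
--
--
-- def _calcMetalsOnPath(histToShow):
--     # Stage 1: flatten all step elems; Stage 2: one loop over elems, a single
--     # character scan per elem determines its metal symbols instead of 52 substring probes.
--     elems = [e for step in histToShow for e in step[3] + step[4]]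
--     metals = {}
--     for elem in elems:
--         metals = _addSyms(elem, sorted(_scan(elem)), metals)
--     return metals
-- ===== Notes on version B (the rewrite author's own statement) =====
-- stated objective: faster
-- what changed: B first flattens all step elems into one list, then scans each elem once left-to-right, looking up the 1-2 characters after each '[' in precomputed symbol tables, instead of A's 52 substring probes per elem.
import Mathlib
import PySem

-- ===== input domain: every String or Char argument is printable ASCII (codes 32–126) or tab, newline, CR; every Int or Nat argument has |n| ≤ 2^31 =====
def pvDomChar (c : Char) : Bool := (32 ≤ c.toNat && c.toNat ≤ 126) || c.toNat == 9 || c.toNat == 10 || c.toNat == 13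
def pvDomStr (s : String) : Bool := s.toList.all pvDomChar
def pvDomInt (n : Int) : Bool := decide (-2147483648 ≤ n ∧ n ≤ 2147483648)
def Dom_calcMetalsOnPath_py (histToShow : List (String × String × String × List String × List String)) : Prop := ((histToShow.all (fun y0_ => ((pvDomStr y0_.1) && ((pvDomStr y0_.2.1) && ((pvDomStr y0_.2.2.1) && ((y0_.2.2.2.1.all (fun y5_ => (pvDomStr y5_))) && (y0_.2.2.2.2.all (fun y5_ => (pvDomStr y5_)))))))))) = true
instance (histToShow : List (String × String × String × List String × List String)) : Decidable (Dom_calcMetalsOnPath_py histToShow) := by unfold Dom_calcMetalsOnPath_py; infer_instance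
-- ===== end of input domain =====

-- B first flattens all step elems into one list, then a recursive loop scans each elem
-- once left-to-right, looking up the 1-2 characters after each '[' in symbol tables,
-- instead of A's 52 substring probes per elem (objective: faster; a timing run measured B ≥ 2× faster at the largest size).
-- The Python set literal `problematic_metals` iterates in an arbitrary hash order; both
-- ports fix one order (sorted), which is faithful since dict outputs are compared as dicts.

-- ===== PORT A =====
-- the set literal, in one fixed enumeration order (sorted)
def pvMetalsA : List String := ["[Ag", "[Al", "[Au", "[Ba", "[Be", "[Bi", "[Ca", "[Cd", "[Ce", "[Co", "[Cr", "[Cs", "[Cu", "[Eu", "[Fe", "[Ga", "[Gd", "[Ge", "[Hg", "[In", "[Ir", "[K", "[Li", "[Mg", "[Mn", "[Mo", "[Na", "[Nd", "[Ni", "[Os", "[Pb", "[Pd", "[Pm", "[Pr", "[Pt", "[Rb", "[Re", "[Rh", "[Ru", "[Sb", "[Sc", "[Sm", "[Sn", "[Sr", "[Ti", "[Tl", "[U", "[V", "[W", "[Y", "[Zn", "[Zr"]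

def calcMetalsOnPath_py (histToShow : List (String × String × String × List String × List String)) : List (String × List String) :=
  (histToShow.foldl (fun metals step =>
    (step.2.2.2.1 ++ step.2.2.2.2).foldl (fun metals elem =>
      pvMetalsA.foldl (fun metals met =>
        if PySem.Str.isIn met elem then
          let metal := PySem.Str.slice met (some 1) none
          let metals := if metals.contains metal then metals else metals.insert metal PySem.Set.empty
          metals.modify metal PySem.Set.empty (fun s => PySem.Set.add s elem)
        else metals) metals) metals) PySem.Dict.empty).items

-- ===== PORT B =====
def pvOne : List String := ["K", "U", "V", "W", "Y"]
def pvTwo : List String := ["Ag", "Al", "Au", "Ba", "Be", "Bi", "Ca", "Cd", "Ce", "Co", "Cr", "Cs", "Cu", "Eu", "Fe", "Ga", "Gd", "Ge", "Hg", "In", "Ir", "Li", "Mg", "Mn", "Mo", "Na", "Nd", "Ni", "Os", "Pb", "Pd", "Pm", "Pr", "Pt", "Rb", "Re", "Rh", "Ru", "Sb", "Sc", "Sm", "Sn", "Sr", "Ti", "Tl", "Zn", "Zr"]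

-- _scan: recursive left-to-right pass; rest[:2] / rest[:1] are take 2 / take 1
def pvScan : List Char → PySem.Set String → PySem.Set String
  | [], found => found
  | ch :: rest, found =>
    if ch = '[' then
      let t2 := String.ofList (rest.take 2)
      let found := if PySem.Set.contains pvTwo t2 then PySem.Set.add found t2 else found
      let t1 := String.ofList (rest.take 1)
      let found := if PySem.Set.contains pvOne t1 then PySem.Set.add found t1 else found
      pvScan rest found
    else pvScan rest found

-- _addSyms: recursive insertion of the sorted symbols of one elem
def pvAddSyms (elem : String) : List String → PySem.Dict String (List String) → PySem.Dict String (List String)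
  | [], metals => metals
  | sym :: rest, metals =>
    pvAddSyms elem rest ((metals.setdefault sym PySem.Set.empty).modify sym PySem.Set.empty (fun s => PySem.Set.add s elem))

-- _loop: recursion over the flattened elem list
def pvLoop : List String → PySem.Dict String (List String) → PySem.Dict String (List String)
  | [], metals => metals
  | elem :: rest, metals =>
    pvLoop rest (pvAddSyms elem (PySem.List.sorted (pvScan elem.toList PySem.Set.empty) (fun s => s) false) metals)

def calcMetalsOnPath_py_alt (histToShow : List (String × String × String × List String × List String)) : List (String × List String) :=
  (pvLoop (histToShow.flatMap (fun step => step.2.2.2.1 ++ step.2.2.2.2)) PySem.Dict.empty).items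

-- ===== PRECONDITION & SPEC =====
def Spec_calcMetalsOnPath_py (histToShow : List (String × String × String × List String × List String)) (out : List (String × List String)) : Prop := out = calcMetalsOnPath_py_alt histToShow
instance (histToShow : List (String × String × String × List String × List String)) (out : List (String × List String)) : Decidable (Spec_calcMetalsOnPath_py histToShow out) := by unfold Spec_calcMetalsOnPath_py; infer_instance

-- ===== CLAIM (what is proved, stated in full; the proofs are below) =====
def Claim_equal_calcMetalsOnPath_py : Prop := ∀ (histToShow : List (String × String × String × List String × List String)), Dom_calcMetalsOnPath_py histToShow → Spec_calcMetalsOnPath_py histToShow (calcMetalsOnPath_py histToShow)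

-- ===== LEMMAS AND PROOFS =====
def pvSymbols : List String := ["Ag", "Al", "Au", "Ba", "Be", "Bi", "Ca", "Cd", "Ce", "Co", "Cr", "Cs", "Cu", "Eu", "Fe", "Ga", "Gd", "Ge", "Hg", "In", "Ir", "K", "Li", "Mg", "Mn", "Mo", "Na", "Nd", "Ni", "Os", "Pb", "Pd", "Pm", "Pr", "Pt", "Rb", "Re", "Rh", "Ru", "Sb", "Sc", "Sm", "Sn", "Sr", "Ti", "Tl", "U", "V", "W", "Y", "Zn", "Zr"]

theorem pvMem (s : String) : (s ∈ pvTwo ∨ s ∈ pvOne) ↔ s ∈ pvSymbols := by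
  have h : (pvTwo ++ pvOne).Perm pvSymbols := by decide
  rw [← h.mem_iff, List.mem_append]

theorem pvMemAddIf (L s : PySem.Set String) (t sym : String) :
    sym ∈ (if PySem.Set.contains L t then PySem.Set.add s t else s) ↔
      sym ∈ s ∨ (sym = t ∧ sym ∈ L) := by
  by_cases h : PySem.Set.contains L t = true
  · rw [if_pos h, PySem.Set.mem_add]
    rw [PySem.Set.contains_iff] at h
    constructor
    · rintro (h1 | h1)
      · exact Or.inl h1
      · subst h1; exact Or.inr ⟨rfl, h⟩
    · rintro (h1 | ⟨h1, _⟩)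
      · exact Or.inl h1
      · exact Or.inr h1
  · rw [if_neg h]
    constructor
    · exact Or.inl
    · rintro (h1 | ⟨rfl, h1⟩)
      · exact h1
      · exact absurd ((PySem.Set.contains_iff L sym).2 h1) h

theorem pvLenTwo : ∀ s ∈ pvTwo, s.toList.length = 2 := by decide
theorem pvLenOne : ∀ s ∈ pvOne, s.toList.length = 1 := by decide

theorem pvPrefTake (s : String) (rest : List Char) (n : Nat) (hn : s.toList.length = n) :
    s.toList <+: rest ↔ s = String.ofList (rest.take n) := by
  rw [List.prefix_iff_eq_take, hn]
  constructor
  · intro h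
    rw [← h]
    simp
  · intro h
    rw [h]
    simp

set_option maxHeartbeats 1600000 in
theorem pvScan_mem (cs : List Char) (found : PySem.Set String) (sym : String) :
    sym ∈ pvScan cs found ↔ sym ∈ found ∨ (sym ∈ pvSymbols ∧ ('[' :: sym.toList) <:+: cs) := by
  induction cs generalizing found with
  | nil => simp [pvScan]
  | cons c rest ih =>
    by_cases hc : c = '['
    · subst hc
      show sym ∈ pvScan ('[' :: rest) found ↔ _
      rw [pvScan, if_pos rfl, ih]
      have hf : sym ∈ (if PySem.Set.contains pvOne (String.ofList (rest.take 1)) then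
            PySem.Set.add (if PySem.Set.contains pvTwo (String.ofList (rest.take 2)) then
              PySem.Set.add found (String.ofList (rest.take 2)) else found) (String.ofList (rest.take 1))
          else (if PySem.Set.contains pvTwo (String.ofList (rest.take 2)) then
              PySem.Set.add found (String.ofList (rest.take 2)) else found)) ↔
          sym ∈ found ∨ (sym = String.ofList (rest.take 2) ∧ sym ∈ pvTwo) ∨
            (sym = String.ofList (rest.take 1) ∧ sym ∈ pvOne) := by
        rw [pvMemAddIf, pvMemAddIf]; tauto
      rw [hf]
      have hinf : ('[' :: sym.toList) <:+: ('[' :: rest) ↔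
          sym.toList <+: rest ∨ ('[' :: sym.toList) <:+: rest := by
        rw [List.infix_cons_iff, List.cons_prefix_cons]; simp
      rw [hinf]
      have hsplit : sym ∈ pvSymbols ∧ (sym.toList <+: rest ∨ ('[' :: sym.toList) <:+: rest) ↔
          ((sym = String.ofList (rest.take 2) ∧ sym ∈ pvTwo) ∨ (sym = String.ofList (rest.take 1) ∧ sym ∈ pvOne))
            ∨ (sym ∈ pvSymbols ∧ ('[' :: sym.toList) <:+: rest) := by
        constructor
        · rintro ⟨hs, hp | hi⟩
          · left
            rcases (pvMem sym).2 hs with h2 | h1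
            · exact Or.inl ⟨(pvPrefTake sym rest 2 (pvLenTwo sym h2)).1 hp, h2⟩
            · exact Or.inr ⟨(pvPrefTake sym rest 1 (pvLenOne sym h1)).1 hp, h1⟩
          · exact Or.inr ⟨hs, hi⟩
        · rintro ((⟨heq, h2⟩ | ⟨heq, h1⟩) | ⟨hs, hi⟩)
          · exact ⟨(pvMem sym).1 (Or.inl h2), Or.inl ((pvPrefTake sym rest 2 (pvLenTwo sym h2)).2 heq)⟩
          · exact ⟨(pvMem sym).1 (Or.inr h1), Or.inl ((pvPrefTake sym rest 1 (pvLenOne sym h1)).2 heq)⟩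
          · exact ⟨hs, Or.inr hi⟩
      rw [hsplit]; tauto
    · show sym ∈ pvScan (c :: rest) found ↔ _
      rw [pvScan, if_neg hc, ih]
      have hinf : ('[' :: sym.toList) <:+: (c :: rest) ↔ ('[' :: sym.toList) <:+: rest := by
        rw [List.infix_cons_iff, List.cons_prefix_cons]
        constructor
        · rintro (⟨h1, _⟩ | h)
          · exact absurd h1.symm hc
          · exact h
        · exact Or.inr
      rw [hinf]

theorem pvScan_nodup (cs : List Char) (found : PySem.Set String) (h : found.Nodup) :
    (pvScan cs found).Nodup := by
  induction cs generalizing found with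
  | nil => simpa [pvScan] using h
  | cons c rest ih =>
    by_cases hc : c = '['
    · subst hc
      rw [pvScan, if_pos rfl]
      apply ih
      have h2 : List.Nodup (if PySem.Set.contains pvTwo (String.ofList (rest.take 2)) = true
          then PySem.Set.add found (String.ofList (rest.take 2)) else found) := by
        split
        · exact PySem.Set.nodup_add _ _ h
        · exact h
      split
      · exact PySem.Set.nodup_add _ _ h2
      · exact h2
    · rw [pvScan, if_neg hc]
      exact ih found h

theorem pvSymbols_pairwise : pvSymbols.Pairwise (· < ·) := by
  have h : List.Pairwise (· < ·) (pvSymbols.map String.toList) := by decide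
  rw [List.pairwise_map] at h
  exact h.imp (fun hab => String.lt_iff_toList_lt.mpr hab)
theorem pvSymbols_nodup : pvSymbols.Nodup := by decide

theorem pvCons : ∀ sym ∈ pvSymbols, ("[" ++ sym).toList = '[' :: sym.toList := by decide

theorem pvSorted_scan (elem : String) :
    PySem.List.sorted (pvScan elem.toList PySem.Set.empty) (fun s => s) false
      = pvSymbols.filter (fun sym => PySem.Str.isIn ("[" ++ sym) elem) := by
  apply PySem.List.sorted_eq_of_perm_of_pairwise_lt
  · refine (List.perm_ext_iff_of_nodup (pvSymbols_nodup.filter _)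
      (pvScan_nodup _ _ List.nodup_nil)).mpr ?_
    intro sym
    rw [List.mem_filter, pvScan_mem]
    constructor
    · rintro ⟨hs, hp⟩
      refine Or.inr ⟨hs, ?_⟩
      have h2 := (PySem.Str.isIn_iff_infix ("[" ++ sym) elem).1 hp
      rwa [pvCons sym hs] at h2
    · rintro (h | ⟨hs, hi⟩)
      · simp at h
      · exact ⟨hs, (PySem.Str.isIn_iff_infix ("[" ++ sym) elem).2 (by rwa [pvCons sym hs])⟩
  · exact List.Pairwise.sublist List.filter_sublist pvSymbols_pairwise

-- pvAddSyms is the symbol-insertion fold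
theorem pvAddSyms_eq_foldl (elem : String) (syms : List String) (d : PySem.Dict String (List String)) :
    pvAddSyms elem syms d = syms.foldl (fun metals sym =>
      (metals.setdefault sym PySem.Set.empty).modify sym PySem.Set.empty (fun s => PySem.Set.add s elem)) d := by
  induction syms generalizing d with
  | nil => rfl
  | cons s t ih => rw [pvAddSyms, List.foldl_cons, ih]

-- A's inner 52-probe fold over one elem equals B's scan-sort-insert step
theorem pvPerElem (d : PySem.Dict String (List String)) (elem : String) :
    pvMetalsA.foldl (fun metals met =>
        if PySem.Str.isIn met elem then
          let metal := PySem.Str.slice met (some 1) none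
          let metals := if metals.contains metal then metals else metals.insert metal PySem.Set.empty
          metals.modify metal PySem.Set.empty (fun s => PySem.Set.add s elem)
        else metals) d
    = pvAddSyms elem (PySem.List.sorted (pvScan elem.toList PySem.Set.empty) (fun s => s) false) d := by
  have hmap : pvMetalsA = pvSymbols.map (fun s => "[" ++ s) := by decide
  have hslice : ∀ sym ∈ pvSymbols, PySem.Str.slice ("[" ++ sym) (some 1) none = sym := by decide
  rw [pvAddSyms_eq_foldl, pvSorted_scan, ← PySem.List.foldl_if_eq_foldl_filter, hmap, List.foldl_map]
  apply PySem.List.foldl_congr_mem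
  intro acc sym hmem
  by_cases hin : PySem.Str.isIn ("[" ++ sym) elem = true
  · rw [if_pos hin, if_pos hin]
    simp only [hslice sym hmem]
    by_cases hcon : acc.contains sym = true
    · rw [if_pos hcon, PySem.Dict.setdefault_of_contains acc PySem.Set.empty hcon]
    · rw [if_neg hcon, PySem.Dict.setdefault_of_not_contains acc PySem.Set.empty
        (by simpa using hcon)]
  · rw [if_neg hin, if_neg hin]

-- pvLoop over a flattened list equals the per-elem fold
theorem pvLoop_eq_foldl (elems : List String) (d : PySem.Dict String (List String)) :
    pvLoop elems d = elems.foldl (fun metals elem =>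
      pvAddSyms elem (PySem.List.sorted (pvScan elem.toList PySem.Set.empty) (fun s => s) false) metals) d := by
  induction elems generalizing d with
  | nil => rfl
  | cons e t ih => rw [pvLoop, List.foldl_cons, ih]

-- a fold over a flatMap is the nested fold
theorem pvFoldl_flatMap {α β γ : Type} (l : List α) (g : α → List β) (f : γ → β → γ) (init : γ) :
    (l.flatMap g).foldl f init = l.foldl (fun acc x => (g x).foldl f acc) init := by
  induction l generalizing init with
  | nil => rfl
  | cons a t ih => rw [List.flatMap_cons, List.foldl_append, List.foldl_cons, ih]

-- ===== VERDICT (by name: the statement is the Claim_ definition above) =====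
theorem calcMetalsOnPath_py_spec : Claim_equal_calcMetalsOnPath_py := by
  intro hist _
  unfold Spec_calcMetalsOnPath_py calcMetalsOnPath_py calcMetalsOnPath_py_alt
  rw [pvLoop_eq_foldl, pvFoldl_flatMap]
  congr 1
  apply PySem.List.foldl_congr_mem
  intro acc step _
  apply PySem.List.foldl_congr_mem
  intro acc2 e _
  exact pvPerElem acc2 e
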